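-- pv_equiv track=rewrite | github.com/akakss225/Python_tutorial | 프로그래머스/레벨1~2/과일장수.py | solution
-- ===== SOURCE A (Python) =====
-- from collections import deque as deq
--
-- def solution(k, m, score):
--     answer = 0
--     score = deq(sorted(score, reverse=True))
--     while len(score) / m >= 1:
--         if len(score) / m >= 2:
--             box = []
--             for i in range(m):
--                 item = score.pop()
--                 box.append(item)
--             answer += min(box) * m
--         else:
--             box = []
--             for i in range(m):
--                 item = score.popleft()
--                 box.append(item)
--             answer += min(box) * m
--     return answer
-- ===== SOURCE B (Python) =====
-- def solution(k, m, score):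
--     s = sorted(score, reverse=True)
--     n = len(s)
--     q = n // m
--     if q < 1:
--         return 0
--     return m * (s[m - 1] + sum(s[n - 1 - t * m] for t in range(q - 1)))
-- ===== Notes on version B (the rewrite author's own statement) =====
-- stated objective: simpler
-- what changed: Replaces the deque plus two-branch while loop (popping m items from one end or the other per iteration) by a closed-form strided-index sum over the descending-sorted list: m * (s[m-1] + sum of s[n-1-t*m] over the q-1 bottom groups, q = n//m).
-- outside the precondition, e.g. on solution(4, 0, [1, 2, 3]): A raises ZeroDivisionError, B raises ZeroDivisionError
import Mathlib
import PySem

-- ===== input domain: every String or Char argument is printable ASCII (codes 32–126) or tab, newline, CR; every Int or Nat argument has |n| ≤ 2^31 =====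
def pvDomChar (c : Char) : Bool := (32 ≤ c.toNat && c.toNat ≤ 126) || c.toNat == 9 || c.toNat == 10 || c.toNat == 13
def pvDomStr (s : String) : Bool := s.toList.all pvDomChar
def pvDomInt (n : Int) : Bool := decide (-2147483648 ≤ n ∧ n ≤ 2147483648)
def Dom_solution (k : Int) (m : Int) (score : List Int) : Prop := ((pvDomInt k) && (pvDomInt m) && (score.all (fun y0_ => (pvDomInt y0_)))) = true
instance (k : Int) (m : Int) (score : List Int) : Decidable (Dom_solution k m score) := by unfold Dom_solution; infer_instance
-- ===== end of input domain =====

-- B replaces A's deque + two-branch while loop by a closed-form strided-index sum over the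
-- descending-sorted list (simpler); A = B is proved for every m ≠ 0 (m = 0 raises in both).


-- ===== PORT A =====
-- the inner 'for i in range(m): item = score.pop(); box.append(item)' (pop from the RIGHT end)
def popRightN : Nat → List Int → List Int × List Int
  | 0, xs => ([], xs)
  | Nat.succ n, xs =>
    match xs.getLast? with
    | some a => let p := popRightN n xs.dropLast; (a :: p.1, p.2)
    | none => ([], xs)   -- deque.pop() on empty raises; unreachable under the loop guard

-- the inner 'for i in range(m): item = score.popleft(); box.append(item)'
def popLeftN : Nat → List Int → List Int × List Int
  | 0, xs => ([], xs)
  | Nat.succ _, [] => ([], [])   -- deque.popleft() on empty raises; unreachable under the loop guard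
  | Nat.succ n, x :: xs => let p := popLeftN n xs; (x :: p.1, p.2)

-- needed by solutionLoop's termination proof
theorem popLeftN_eq (n : Nat) (xs : List Int) (h : n ≤ xs.length) :
    popLeftN n xs = (xs.take n, xs.drop n) := by
  induction n generalizing xs with
  | zero => simp [popLeftN]
  | succ n ih =>
    cases xs with
    | nil => simp at h
    | cons x xs =>
      simp only [popLeftN, List.take_succ_cons, List.drop_succ_cons]
      rw [ih xs (by simpa using h)]

-- needed by solutionLoop's termination proof
theorem popRightN_eq (n : Nat) (xs : List Int) (h : n ≤ xs.length) :
    popRightN n xs = ((xs.drop (xs.length - n)).reverse, xs.take (xs.length - n)) := by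
  induction n generalizing xs with
  | zero => simp [popRightN]
  | succ n ih =>
    rcases List.eq_nil_or_concat xs with rfl | ⟨ys, a, rfl⟩
    · simp at h
    · simp only [List.concat_eq_append] at h ⊢
      have hlen : (ys ++ [a]).length = ys.length + 1 := by simp
      have hn : n ≤ ys.length := by simp at h; omega
      simp only [popRightN, List.getLast?_concat, List.dropLast_concat]
      rw [ih ys hn]
      have h1 : (ys ++ [a]).length - (n + 1) = ys.length - n := by omega
      rw [h1]
      rw [List.drop_append_of_le_length (by omega), List.take_append_of_le_length (by omega)]
      simp

-- 'while len(score) / m >= 1: if len(score) / m >= 2: … pop … else: … popleft …'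
-- The float comparisons len/m >= 1 and len/m >= 2 are ported as the exact integer facts
-- (0 < m ∧ m ≤ len) and (2*m ≤ len): exact on the stated domain (|m| ≤ 2^31), where the
-- correctly-rounded float quotient cannot cross 1.0 or 2.0.
def solutionLoop (m : Int) (score : List Int) (answer : Int) : Int :=
  if h : 0 < m ∧ m ≤ (score.length : Int) then
    if 2 * m ≤ (score.length : Int) then
      let p := popRightN m.toNat score
      solutionLoop m p.2 (answer + ((PySem.List.min? p.1 (fun x => x)).getD 0) * m)
    else
      let p := popLeftN m.toNat score
      solutionLoop m p.2 (answer + ((PySem.List.min? p.1 (fun x => x)).getD 0) * m)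
  else answer
termination_by score.length
decreasing_by
  · rw [popRightN_eq m.toNat score (by omega)]
    simp [List.length_take]; omega
  · rw [popLeftN_eq m.toNat score (by omega)]
    simp [List.length_drop]; omega

def solution (k : Int) (m : Int) (score : List Int) : Int :=
  solutionLoop m (PySem.List.sorted score (fun x => x) true) 0

-- ===== PORT B =====
def solution_alt (k : Int) (m : Int) (score : List Int) : Int :=
  let s := PySem.List.sorted score (fun x => x) true
  let n : Int := s.length
  let q := PySem.Int.floordiv n m
  if q < 1 then 0
  else
    m * (PySem.List.pyGetD s (m - 1) 0 +
      ((PySem.List.pyRange 0 (q - 1) 1).map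
        (fun t => PySem.List.pyGetD s (n - 1 - t * m) 0)).sum)

-- ===== PRECONDITION & SPEC =====
-- Pre_ excludes only m = 0, on which A raises ZeroDivisionError at 'len(score) / m' (B raises too).
def Pre_solution (k : Int) (m : Int) (score : List Int) : Prop := m ≠ 0
instance (k : Int) (m : Int) (score : List Int) : Decidable (Pre_solution k m score) := by
  unfold Pre_solution; infer_instance
def pvWitness_solution : Int × Int × List Int := (3, 4, [1, 2, 3, 1, 2, 3, 1])

def Spec_solution (k : Int) (m : Int) (score : List Int) (out : Int) : Prop :=
  out = solution_alt k m score
instance (k : Int) (m : Int) (score : List Int) (out : Int) : Decidable (Spec_solution k m score out) := by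
  unfold Spec_solution; infer_instance

-- ===== CLAIM (what is proved, stated in full; the proof is below) =====
def Claim_equal_solution : Prop := ∀ (k : Int) (m : Int) (score : List Int), Dom_solution k m score → Pre_solution k m score → Spec_solution k m score (solution k m score)

-- ===== LEMMAS AND PROOFS =====

-- A's loop on the sorted list, rephrased as a pure recursion (proof-only helper)
def ASum (mn : Nat) (s : List Int) : Int :=
  if h : 0 < mn ∧ mn ≤ s.length then
    if 2 * mn ≤ s.length then s.getD (s.length - 1) 0 + ASum mn (s.take (s.length - mn))
    else s.getD (mn - 1) 0
  else 0
termination_by s.length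
decreasing_by simp [List.length_take]; omega

theorem sub_div_same (n mn : Nat) (h : 0 < mn) (h2 : mn ≤ n) :
    (n - mn) / mn = n / mn - 1 ∧ (n - mn) % mn = n % mn := by
  have hd := Nat.div_add_mod n mn
  have hq : 1 ≤ n / mn := (Nat.one_le_div_iff h).mpr h2
  obtain ⟨q', hq'⟩ : ∃ q', n / mn = q' + 1 := ⟨n / mn - 1, by omega⟩
  have hn : n - mn = mn * q' + n % mn := by rw [hq'] at hd; ring_nf at hd ⊢; omega
  constructor
  · rw [hn, Nat.mul_add_div h, Nat.div_eq_of_lt (Nat.mod_lt n h)]; omega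
  · rw [hn, Nat.mul_add_mod]
    exact Nat.mod_mod_of_dvd _ dvd_rfl

theorem getD_take (s : List Int) (k i : Nat) (h : i < k) :
    (s.take k).getD i 0 = s.getD i 0 := by
  rw [List.getD_eq_getElem?_getD, List.getD_eq_getElem?_getD, List.getElem?_take_of_lt h]

-- in a descending-sorted list, later entries are ≤ earlier ones
theorem desc_getElem_le {ys : List Int} (hp : ys.Pairwise (fun a b => b ≤ a))
    {i j : Nat} (hij : i ≤ j) (hj : j < ys.length) : ys[j] ≤ ys[i] := by
  rcases Nat.lt_or_ge i j with hlt | hge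
  · exact (List.pairwise_iff_getElem.mp hp) i j (by omega) hj hlt
  · have : i = j := by omega
    subst this; exact le_refl _

-- min() of a nonempty list whose value c is a lower bound and a member
theorem min_value_eq {ys : List Int} (hne : ys ≠ []) {c : Int}
    (hlb : ∀ x ∈ ys, c ≤ x) (hmem : c ∈ ys) :
    ((PySem.List.min? ys (fun x => x)).getD 0) = c := by
  rcases h : PySem.List.min? ys (fun x => x) with _ | v
  · exact absurd ((PySem.List.min?_eq_none_iff ys _).mp h) hne
  · have h1 : v ≤ c := PySem.List.min?_isMin h c hmem
    have h2 : c ≤ v := hlb v (PySem.List.min?_mem h)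
    simp; omega

theorem loop_char (m : Int) (hm : 0 < m) :
    ∀ n (s : List Int), s.length = n → s.Pairwise (fun a b => b ≤ a) →
      ∀ ans, solutionLoop m s ans = ans + ASum m.toNat s * m := by
  intro n
  induction n using Nat.strong_induction_on with
  | _ n ih =>
    intro s hlen hp ans
    rw [solutionLoop, ASum]
    by_cases h1 : 0 < m ∧ m ≤ (s.length : Int)
    · have hmn : 0 < m.toNat ∧ m.toNat ≤ s.length := by omega
      rw [dif_pos h1, dif_pos hmn]
      by_cases h2 : 2 * m ≤ (s.length : Int)
      · rw [if_pos h2, if_pos (show 2 * m.toNat ≤ s.length by omega)]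
        simp only [popRightN_eq m.toNat s hmn.2]
        set mn := m.toNat with hmndef
        have hlt : s.length - 1 < s.length := by omega
        have hcmin : ((PySem.List.min? (s.drop (s.length - mn)).reverse (fun x => x)).getD 0)
            = s.getD (s.length - 1) 0 := by
          rw [List.getD_eq_getElem s 0 hlt]
          apply min_value_eq
          · simp [List.length_drop]; omega
          · intro x hx
            rw [List.mem_reverse] at hx
            obtain ⟨j, hj, rfl⟩ := List.mem_iff_getElem.mp hx
            rw [List.getElem_drop]
            exact desc_getElem_le hp (by simp [List.length_drop] at hj; omega)
              (by simp [List.length_drop] at hj; omega)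
          · rw [List.mem_reverse]
            have hj : mn - 1 < (s.drop (s.length - mn)).length := by simp [List.length_drop]; omega
            have : (s.drop (s.length - mn))[mn - 1] = s[s.length - 1] := by
              rw [List.getElem_drop]
              congr 1; omega
            rw [← this]
            exact List.getElem_mem hj
        rw [hcmin]
        have hrest : (s.take (s.length - mn)).length < n := by
          simp [List.length_take]; omega
        rw [ih _ hrest (s.take (s.length - mn)) rfl (hp.sublist (List.take_sublist _ _)) _]
        ring
      · rw [if_neg h2, if_neg (show ¬ 2 * m.toNat ≤ s.length by omega)]
        simp only [popLeftN_eq m.toNat s hmn.2]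
        set mn := m.toNat with hmndef
        have hlt : mn - 1 < s.length := by omega
        have hcmin : ((PySem.List.min? (s.take mn) (fun x => x)).getD 0) = s.getD (mn - 1) 0 := by
          rw [List.getD_eq_getElem s 0 hlt]
          apply min_value_eq
          · apply List.ne_nil_of_length_pos; simp [List.length_take]; omega
          · intro x hx
            obtain ⟨j, hj, rfl⟩ := List.mem_iff_getElem.mp hx
            rw [List.getElem_take]
            exact desc_getElem_le hp (by simp [List.length_take] at hj; omega) (by omega)
          · have hj : mn - 1 < (s.take mn).length := by simp [List.length_take]; omega
            have : (s.take mn)[mn - 1] = s[mn - 1] := List.getElem_take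
            rw [← this]
            exact List.getElem_mem hj
        rw [hcmin]
        have hrest : (s.drop mn).length < n := by simp [List.length_drop]; omega
        rw [ih _ hrest (s.drop mn) rfl (hp.sublist (List.drop_sublist _ _)) _]
        rw [ASum, dif_neg (by simp [List.length_drop]; omega)]
        ring
    · rw [dif_neg h1, dif_neg (by omega)]
      ring

theorem ASum_closed (mn : Nat) (hmn : 0 < mn) :
    ∀ n (s : List Int), s.length = n →
    ASum mn s =
      if s.length / mn = 0 then 0
      else s.getD (mn - 1) 0 +
        ((List.range (s.length / mn - 1)).map (fun t => s.getD (s.length - 1 - t * mn) 0)).sum := by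
  intro n
  induction n using Nat.strong_induction_on with
  | _ n ih =>
    intro s hlen
    rw [ASum]
    by_cases h1 : 0 < mn ∧ mn ≤ s.length
    · rw [dif_pos h1]
      have hq1 : 1 ≤ s.length / mn := (Nat.one_le_div_iff hmn).mpr h1.2
      by_cases h2 : 2 * mn ≤ s.length
      · rw [if_pos h2]
        have hq2 : 2 ≤ s.length / mn := (Nat.le_div_iff_mul_le hmn).mpr (by omega)
        have hsub := sub_div_same s.length mn hmn h1.2
        have htl : (s.take (s.length - mn)).length = s.length - mn := by
          simp [List.length_take]
        rw [ih (s.take (s.length - mn)).length (by omega) _ rfl]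
        rw [htl, hsub.1, if_neg (by omega)]
        rw [getD_take _ _ _ (by omega)]
        have hmap : (List.range (s.length / mn - 1 - 1)).map
              (fun u => (s.take (s.length - mn)).getD (s.length - mn - 1 - u * mn) 0)
            = (List.range (s.length / mn - 1 - 1)).map
              (fun u => s.getD (s.length - 1 - (u + 1) * mn) 0) := by
          apply List.map_congr_left
          intro u hu
          rw [List.mem_range] at hu
          have h4 : (u + 2) * mn ≤ (s.length / mn) * mn := Nat.mul_le_mul_right _ (by omega)
          have hql : (s.length / mn) * mn ≤ s.length := Nat.div_mul_le_self _ _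
          have h6 : u * mn + 2 * mn ≤ s.length := by
            calc u * mn + 2 * mn = (u + 2) * mn := by ring
              _ ≤ (s.length / mn) * mn := h4
              _ ≤ s.length := hql
          have h7 : (u + 1) * mn = u * mn + mn := by ring
          rw [h7]
          generalize hw : u * mn = w at h6 ⊢
          rw [getD_take _ _ _ (by omega)]
          congr 1
          omega
        rw [hmap]
        have hpeel : List.range (s.length / mn - 1)
            = 0 :: (List.range (s.length / mn - 1 - 1)).map Nat.succ := by
          have : s.length / mn - 1 = (s.length / mn - 1 - 1) + 1 := by omega
          rw [this, List.range_succ_eq_map]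
          simp
        rw [hpeel]
        rw [if_neg (by omega)]
        simp only [List.map_cons, List.sum_cons, List.map_map]
        rw [show s.length - 1 - 0 * mn = s.length - 1 by omega]
        have hmap2 : List.map ((fun t => s.getD (s.length - 1 - t * mn) 0) ∘ Nat.succ)
              (List.range (s.length / mn - 1 - 1))
            = List.map (fun u => s.getD (s.length - 1 - (u + 1) * mn) 0)
              (List.range (s.length / mn - 1 - 1)) := by
          apply List.map_congr_left; intro u _
          simp only [Function.comp_apply]
        rw [hmap2]
        ring
      · rw [if_neg h2, if_neg (by omega)]
        have : s.length / mn - 1 = 0 := by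
          have : s.length / mn < 2 := Nat.div_lt_of_lt_mul (by omega)
          omega
        rw [this]
        simp
    · rw [dif_neg h1]
      have : s.length / mn = 0 := Nat.div_eq_of_lt (by omega)
      rw [if_pos this]

-- A returns 0 for negative m (the while-guard is false)
theorem solution_char_neg (k m : Int) (score : List Int) (hm : m < 0) :
    solution k m score = 0 := by
  unfold solution
  rw [solutionLoop, dif_neg (by omega)]

-- B returns 0 for negative m: q = floor(n/m) ≤ 0 when n ≥ 0 and m < 0
theorem alt_char_neg (k m : Int) (score : List Int) (hm : m < 0) :
    solution_alt k m score = 0 := by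
  unfold solution_alt
  dsimp only
  set n : Int := ((PySem.List.sorted score (fun x => x) true).length : Int) with hn
  have hn0 : 0 ≤ n := Int.natCast_nonneg _
  have h1 := PySem.Int.floordiv_mul_add_mod n m
  have h2 := (PySem.Int.mod_neg_bounds (a := n) hm).2
  have hq : PySem.Int.floordiv n m < 1 := by nlinarith [PySem.Int.floordiv_mul_add_mod n m]
  rw [if_pos hq]

-- B's value for positive m, expressed through ASum's closed form
theorem alt_char_pos (k m : Int) (score : List Int) (hm : 1 ≤ m) :
    solution_alt k m score = ASum m.toNat (PySem.List.sorted score (fun x => x) true) * m := by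
  obtain ⟨mn, rfl⟩ : ∃ mn : Nat, m = (mn : Int) := ⟨m.toNat, (Int.toNat_of_nonneg (by omega)).symm⟩
  have hmn : 0 < mn := by exact_mod_cast hm
  unfold solution_alt
  dsimp only
  set s := PySem.List.sorted score (fun x => x) true with hs
  set q := s.length / mn with hq
  have hfd : PySem.Int.floordiv (s.length : Int) (mn : Int) = (q : Int) := PySem.Int.floordiv_natCast _ _
  have hqm : q * mn ≤ s.length := by rw [hq]; exact Nat.div_mul_le_self _ _
  clear_value s q
  rw [hfd, show ((mn:Int)).toNat = mn from Int.toNat_natCast mn]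
  rw [ASum_closed mn hmn s.length s rfl, ← hq]
  by_cases hq0 : q = 0
  · rw [if_pos (show ((q:Int)) < 1 by rw [hq0]; norm_num), if_pos hq0]
    simp
  · have hq1 : 1 ≤ q := Nat.one_le_iff_ne_zero.mpr hq0
    rw [if_neg (show ¬ ((q:Int) < 1) by push_cast; omega), if_neg hq0]
    rw [PySem.List.pyRange_one, show (((q:Int) - 1 - 0)).toNat = q - 1 by omega, List.map_map]
    have hidxm : PySem.List.pyGetD s ((mn:Int) - 1) 0 = s.getD (mn - 1) 0 := by
      have : ((mn:Int) - 1) = ((mn - 1 : Nat) : Int) := by push_cast [Nat.cast_sub hmn]; ring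
      rw [this, PySem.List.pyGetD_natCast]
    rw [hidxm]
    have hmap : List.map ((fun t => PySem.List.pyGetD s ((s.length : Int) - 1 - t * (mn:Int)) 0) ∘
          (fun k : Nat => (0:Int) + (k:Int))) (List.range (q - 1))
        = List.map (fun t => s.getD (s.length - 1 - t * mn) 0) (List.range (q - 1)) := by
      apply List.map_congr_left
      intro t ht
      rw [List.mem_range] at ht
      simp only [Function.comp_apply]
      have htm : t * mn + mn ≤ s.length := by
        have h5 : (t + 1) * mn ≤ q * mn := Nat.mul_le_mul_right _ (by omega)
        calc t * mn + mn = (t + 1) * mn := by ring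
          _ ≤ q * mn := h5
          _ ≤ s.length := hqm
      have hidx : (s.length : Int) - 1 - (0 + (t:Int)) * (mn:Int)
          = ((s.length - 1 - t * mn : Nat) : Int) := by
        push_cast [Nat.cast_sub (show t * mn ≤ s.length - 1 by omega),
          Nat.cast_sub (show 1 ≤ s.length by omega)]
        ring
      rw [hidx, PySem.List.pyGetD_natCast]
    rw [hmap]
    ring

-- A's result through ASum, for positive m
theorem solution_char_pos (k m : Int) (score : List Int) (hm : 1 ≤ m) :
    solution k m score = ASum m.toNat (PySem.List.sorted score (fun x => x) true) * m := by
  unfold solution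
  rw [loop_char m (by omega) (PySem.List.sorted score (fun x => x) true).length _ rfl
    (PySem.List.sorted_pairwise_rev score (fun x => x)) 0]
  ring

-- ===== VERDICT (by name: the statement is the Claim_ definition above) =====
theorem solution_spec : Claim_equal_solution := by
  intro k m score hdom hpre
  unfold Spec_solution
  by_cases hneg : m < 0
  · rw [solution_char_neg k m score hneg, alt_char_neg k m score hneg]
  · have hm1 : 1 ≤ m := by
      have : m ≠ 0 := hpre
      omega
    rw [solution_char_pos k m score hm1, alt_char_pos k m score hm1]
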